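-- pv_equiv track=rewrite | github.com/SBRG/PM_Activity_Calls | utils.py | get_strain_media
-- ===== SOURCE A (Python) =====
-- def get_strain_media(column_name):
--     """
--     Gets the strain and media type for a column name in the plate datatype
--     """
--     strain = ''
--     media = ''
--     flag = 0
--     for char in column_name:
--         if(char=='_'):
--             flag = flag+1
--         if(flag>1):
--             break
--         if(flag<1):
--             strain = strain+char
--         if(flag>0):
--             media = media+char
--
--     media = media[1:]
--
--     return strain,media
-- ===== SOURCE B (Python) =====
-- def get_strain_media(column_name):
--     """
--     Gets the strain and media type for a column name in the plate datatype
--     """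
--     i = column_name.find('_')
--     if i == -1:
--         return column_name, ''
--     j = column_name.find('_', i + 1)
--     if j == -1:
--         return column_name[:i], column_name[i + 1:]
--     return column_name[:i], column_name[i + 1:j]
-- ===== Notes on version B (the rewrite author's own statement) =====
-- stated objective: faster
-- what changed: Replaces the flag-threading character-by-character accumulation loop with index arithmetic: locate the first and second underscore with str.find and return two slices.
import Mathlib
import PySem

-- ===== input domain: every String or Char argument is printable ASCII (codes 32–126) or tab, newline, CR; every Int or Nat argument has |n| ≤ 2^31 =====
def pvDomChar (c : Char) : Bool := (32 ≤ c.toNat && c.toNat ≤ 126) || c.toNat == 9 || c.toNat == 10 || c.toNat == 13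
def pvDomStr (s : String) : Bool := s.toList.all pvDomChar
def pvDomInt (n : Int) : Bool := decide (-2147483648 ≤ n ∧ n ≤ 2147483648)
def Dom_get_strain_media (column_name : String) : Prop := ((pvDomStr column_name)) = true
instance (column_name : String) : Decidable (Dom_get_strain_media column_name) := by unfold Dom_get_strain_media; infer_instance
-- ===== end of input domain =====

-- B replaces A's flag-threading character-accumulation loop by locating the two '_' delimiters with find and slicing (idiomatic).

-- ===== PORT A =====
-- the for-loop of A: state (strain, media, flag); 'break' returns the state as it stands
def pvLoopA : List Char → List Char → List Char → Nat → (List Char × List Char)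
  | [], strain, media, _ => (strain, media)
  | c :: rest, strain, media, flag =>
      let flag' := if c = '_' then flag + 1 else flag
      if flag' > 1 then (strain, media)
      else
        pvLoopA rest (if flag' < 1 then strain ++ [c] else strain)
                     (if flag' > 0 then media ++ [c] else media) flag'

def get_strain_media (column_name : String) : String × String :=
  let r := pvLoopA column_name.toList [] [] 0
  let strain := String.ofList r.1
  let media := PySem.Str.slice (String.ofList r.2) (some 1) none   -- media[1:]
  (strain, media)

-- ===== PORT B =====
def get_strain_media_alt (column_name : String) : String × String :=
  let i := PySem.Str.find column_name "_"
  if i = -1 then (column_name, "") else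
  let j := PySem.Str.findFrom column_name "_" (i + 1) none
  if j = -1 then
    (PySem.Str.slice column_name none (some i), PySem.Str.slice column_name (some (i + 1)) none)
  else
    (PySem.Str.slice column_name none (some i), PySem.Str.slice column_name (some (i + 1)) (some j))

-- ===== PRECONDITION & SPEC =====
def Spec_get_strain_media (column_name : String) (out : String × String) : Prop := out = get_strain_media_alt column_name
instance (column_name : String) (out : String × String) : Decidable (Spec_get_strain_media column_name out) := by unfold Spec_get_strain_media; infer_instance

-- ===== CLAIM (what is proved, stated in full; the proofs are below) =====
def Claim_equal_get_strain_media : Prop := ∀ (column_name : String), Dom_get_strain_media column_name → Spec_get_strain_media column_name (get_strain_media column_name)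

-- ===== LEMMAS AND PROOFS =====

-- take/drop at the takeWhile boundary
theorem pvTakeLen (p : Char → Bool) : ∀ l : List Char, l.take ((l.takeWhile p).length) = l.takeWhile p
  | [] => rfl
  | c :: t => by by_cases h : p c <;> simp [h, pvTakeLen p t]

theorem pvDropLen (p : Char → Bool) : ∀ l : List Char, l.drop ((l.takeWhile p).length) = l.dropWhile p
  | [] => rfl
  | c :: t => by by_cases h : p c <;> simp [h, pvDropLen p t]

theorem pvTakeWhileIdx (p : Char → Bool) : ∀ (l : List Char) (i : Nat), i < (l.takeWhile p).length → ∀ (h' : i < l.length), p (l[i]'h') = true := by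
  intro l
  induction l with
  | nil => intro i h; simp at h
  | cons c t ih =>
      intro i h h'
      by_cases hc : p c
      · cases i with
        | zero => simpa using hc
        | succ n =>
            simp [hc] at h
            simpa using ih n (by omega) (by simpa using h')
      · simp [hc] at h

-- splitting a list at its first '_'
theorem pvSplit (s : List Char) (h : '_' ∈ s) :
    ∃ rest, s.dropWhile (fun x => x != '_') = '_' :: rest ∧
      s = s.takeWhile (fun x => x != '_') ++ '_' :: rest := by
  have hne : s.dropWhile (fun x => x != '_') ≠ [] := by
    intro hnil
    have hts : s.takeWhile (fun x => x != '_') = s := by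
      have := List.takeWhile_append_dropWhile (p := fun x => x != '_') (l := s)
      rw [hnil, List.append_nil] at this; exact this
    have := List.mem_takeWhile_imp (hts ▸ h)
    simp at this
  obtain ⟨a, t, hd⟩ : ∃ a t, s.dropWhile (fun x => x != '_') = a :: t := by
    cases hc : s.dropWhile (fun x => x != '_') with
    | nil => exact absurd hc hne
    | cons a t => exact ⟨a, t, rfl⟩
  have hhead := List.head_dropWhile_not (p := fun x => x != '_') hne
  have ha : a = '_' := by
    have h1 : (s.dropWhile (fun x => x != '_')).head hne = a := by simp [hd]
    have : ((a != '_') = false) := by rw [← h1]; exact hhead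
    simpa using this
  subst ha
  refine ⟨t, hd, ?_⟩
  conv_lhs => rw [← List.takeWhile_append_dropWhile (p := fun x => x != '_') (l := s)]
  rw [hd]

-- find of a single character = length of the maximal prefix avoiding it
theorem pvFindMem (s : List Char) (h : '_' ∈ s) :
    PySem.Chars.find s ['_'] = ((s.takeWhile (fun x => x != '_')).length : Int) := by
  have hinf : ['_'] <:+: s := (List.singleton_infix_iff '_' s).mpr h
  have h0 : (0 : Int) ≤ PySem.Chars.find s ['_'] := (PySem.Chars.find_nonneg_iff s ['_']).mpr hinf
  obtain ⟨hpref, hmin⟩ := PySem.Chars.find_spec (s := s) (sub := ['_']) h0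
  set k := (s.takeWhile (fun x => x != '_')).length with hk
  obtain ⟨rest, hdw, hsplit⟩ := pvSplit s h
  have hkp : ['_'] <+: s.drop k := by
    rw [hk, pvDropLen, hdw]; exact ⟨rest, rfl⟩
  have hklt : ∀ i < k, ¬ ['_'] <+: s.drop i := by
    intro i hi hpre
    obtain ⟨u, hu⟩ := hpre
    have hilen : i < s.length := lt_of_lt_of_le hi (by rw [hk]; exact (List.takeWhile_sublist _).length_le)
    have h2 : s[i]? = some '_' := by
      rw [← Nat.add_zero i, ← List.getElem?_drop, ← hu]; rfl
    have hchar : s[i]'hilen = '_' := by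
      have := List.getElem?_eq_getElem hilen
      rw [this] at h2; exact Option.some.inj h2
    have hp := pvTakeWhileIdx (fun x => x != '_') s i (by omega) hilen
    rw [hchar] at hp
    simp at hp
  have hn0 : (PySem.Chars.find s ['_']).toNat = k := by
    rcases Nat.lt_trichotomy (PySem.Chars.find s ['_']).toNat k with hlt | heq | hgt
    · exact absurd hpref (hklt _ hlt)
    · exact heq
    · exact absurd hkp (hmin k hgt)
  omega

theorem pvFindNotMem (s : List Char) (h : '_' ∉ s) : PySem.Chars.find s ['_'] = -1 := by
  rw [PySem.Chars.find_eq_neg_one_iff]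
  rw [List.singleton_infix_iff]; exact h

-- A's loop after the first '_' has been seen (flag = 1)
theorem pvLoopA_one : ∀ (cs strain media : List Char),
    pvLoopA cs strain media 1 = (strain, media ++ cs.takeWhile (fun x => x != '_'))
  | [], _, _ => by simp [pvLoopA]
  | c :: rest, strain, media => by
      by_cases h : c = '_'
      · subst h; simp [pvLoopA]
      · simp [pvLoopA, h, pvLoopA_one rest strain (media ++ [c])]

-- A's loop from the start
theorem pvLoopA_zero : ∀ (cs strain : List Char),
    pvLoopA cs strain [] 0 =
      (strain ++ cs.takeWhile (fun x => x != '_'),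
       if '_' ∈ cs then '_' :: ((cs.dropWhile (fun x => x != '_')).tail).takeWhile (fun x => x != '_') else [])
  | [], strain => by simp [pvLoopA]
  | c :: rest, strain => by
      by_cases h : c = '_'
      · subst h
        simp [pvLoopA, pvLoopA_one rest strain ['_']]
      · simp [pvLoopA, h, Ne.symm h, pvLoopA_zero rest (strain ++ [c])]

-- strings are equal when their character lists are
theorem pvStrEq {a b : String} (h : a.toList = b.toList) : a = b := by
  have := congrArg String.ofList h
  simpa [String.ofList_toList] using this

-- ===== VERDICT (by name: the statement is the Claim_ definition above) =====
theorem get_strain_media_spec : Claim_equal_get_strain_media := by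
  intro cn _
  show get_strain_media cn = get_strain_media_alt cn
  by_cases h : '_' ∈ cn.toList
  · obtain ⟨rest, hdw, hsplit⟩ := pvSplit cn.toList h
    have hf : PySem.Chars.find cn.toList ['_'] = (((cn.toList.takeWhile (fun x => x != '_')).length : Nat) : Int) := pvFindMem cn.toList h
    have hSfind : PySem.Str.find cn "_" = (((cn.toList.takeWhile (fun x => x != '_')).length : Nat) : Int) := by
      simpa using hf
    have hcons : cn.toList.takeWhile (fun x => x != '_') ++ '_' :: rest =
        (cn.toList.takeWhile (fun x => x != '_') ++ ['_']) ++ rest := by simp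
    have hdrop : cn.toList.drop ((cn.toList.takeWhile (fun x => x != '_')).length + 1) = rest := by
      have h1 : ((cn.toList.takeWhile (fun x => x != '_') ++ ['_'])).length =
          (cn.toList.takeWhile (fun x => x != '_')).length + 1 := by simp
      have h2 := List.drop_left (l₁ := cn.toList.takeWhile (fun x => x != '_') ++ ['_']) (l₂ := rest)
      rw [h1, ← hcons, ← hsplit] at h2
      exact h2
    have htake : cn.toList.take ((cn.toList.takeWhile (fun x => x != '_')).length) =
        cn.toList.takeWhile (fun x => x != '_') := by
      have h2 := List.take_left (l₁ := cn.toList.takeWhile (fun x => x != '_')) (l₂ := '_' :: rest)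
      rw [← hsplit] at h2
      exact h2
    have hlen1 : (cn.toList.takeWhile (fun x => x != '_')).length + 1 ≤ cn.toList.length := by
      conv_rhs => rw [hsplit]
      simp
    have hA : get_strain_media cn =
        (String.ofList (cn.toList.takeWhile (fun x => x != '_')),
         String.ofList (rest.takeWhile (fun x => x != '_'))) := by
      unfold get_strain_media
      rw [pvLoopA_zero]
      simp only [h, if_true, List.nil_append, hdw, List.tail_cons]
      refine Prod.ext rfl (pvStrEq ?_)
      simp [PySem.Chars.slice_eq_listSlice, PySem.List.slice_from_one]
    have hff : PySem.Str.findFrom cn "_" ((((cn.toList.takeWhile (fun x => x != '_')).length : Nat) : Int) + 1) none =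
        (if PySem.Chars.find rest ['_'] = -1 then -1
         else (((cn.toList.takeWhile (fun x => x != '_')).length + 1 : Nat) : Int) + PySem.Chars.find rest ['_']) := by
      have hcast : ((((cn.toList.takeWhile (fun x => x != '_')).length : Nat) : Int) + 1) =
          (((cn.toList.takeWhile (fun x => x != '_')).length + 1 : Nat) : Int) := by push_cast; ring
      rw [PySem.Str.findFrom_eq, hcast,
          PySem.Chars.findFrom_natCast cn.toList "_".toList _ hlen1]
      simp [hdrop]
    by_cases hrest : '_' ∈ rest
    · have hfr : PySem.Chars.find rest ['_'] = (((rest.takeWhile (fun x => x != '_')).length : Nat) : Int) := pvFindMem rest hrest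
      have hB : get_strain_media_alt cn =
          (PySem.Str.slice cn none (some (((cn.toList.takeWhile (fun x => x != '_')).length : Nat) : Int)),
           PySem.Str.slice cn (some ((((cn.toList.takeWhile (fun x => x != '_')).length : Nat) : Int) + 1))
             (some ((((cn.toList.takeWhile (fun x => x != '_')).length + 1 : Nat) : Int) + (((rest.takeWhile (fun x => x != '_')).length : Nat) : Int)))) := by
        unfold get_strain_media_alt
        rw [hSfind]
        rw [if_neg (by omega)]
        rw [hff, hfr]
        rw [if_neg (by omega)]
        rw [if_neg (by omega)]
      rw [hA, hB]
      refine Prod.ext (pvStrEq ?_) (pvStrEq ?_)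
      · simp only [PySem.Str.toList_slice, PySem.Chars.slice_eq_listSlice,
          PySem.List.slice_to_natCast, String.toList_ofList]
        exact htake.symm
      · simp only [PySem.Str.toList_slice, PySem.Chars.slice_eq_listSlice, String.toList_ofList]
        have hcast : ((((cn.toList.takeWhile (fun x => x != '_')).length : Nat) : Int) + 1) =
            (((cn.toList.takeWhile (fun x => x != '_')).length + 1 : Nat) : Int) := by push_cast; ring
        rw [hcast, ← Nat.cast_add, PySem.List.slice_natCast, hdrop]
        rw [Nat.add_sub_cancel_left]
        exact (pvTakeLen _ rest).symm
    · have hfr : PySem.Chars.find rest ['_'] = -1 := pvFindNotMem rest hrest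
      have htwr : rest.takeWhile (fun x => x != '_') = rest :=
        List.takeWhile_eq_self_iff.mpr (by intro x hx; simp only [bne_iff_ne, ne_eq]; intro he; subst he; exact hrest hx)
      have hB : get_strain_media_alt cn =
          (PySem.Str.slice cn none (some (((cn.toList.takeWhile (fun x => x != '_')).length : Nat) : Int)),
           PySem.Str.slice cn (some ((((cn.toList.takeWhile (fun x => x != '_')).length : Nat) : Int) + 1)) none) := by
        unfold get_strain_media_alt
        rw [hSfind]
        rw [if_neg (by omega)]
        rw [hff, hfr]
        rw [if_pos rfl, if_pos rfl]
      rw [hA, hB]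
      refine Prod.ext (pvStrEq ?_) (pvStrEq ?_)
      · simp only [PySem.Str.toList_slice, PySem.Chars.slice_eq_listSlice,
          PySem.List.slice_to_natCast, String.toList_ofList]
        exact htake.symm
      · simp only [PySem.Str.toList_slice, PySem.Chars.slice_eq_listSlice, String.toList_ofList]
        have hcast : ((((cn.toList.takeWhile (fun x => x != '_')).length : Nat) : Int) + 1) =
            (((cn.toList.takeWhile (fun x => x != '_')).length + 1 : Nat) : Int) := by push_cast; ring
        rw [hcast, PySem.List.slice_from_natCast, hdrop, htwr]
  · have hf : PySem.Chars.find cn.toList ['_'] = -1 := pvFindNotMem cn.toList h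
    have htw : cn.toList.takeWhile (fun x => x != '_') = cn.toList :=
      List.takeWhile_eq_self_iff.mpr (by intro x hx; simp only [bne_iff_ne, ne_eq]; intro he; subst he; exact h hx)
    have hB : get_strain_media_alt cn = (cn, "") := by
      unfold get_strain_media_alt
      rw [show PySem.Str.find cn "_" = -1 by simpa using hf]
      rw [if_pos rfl]
    have hA : get_strain_media cn = (cn, "") := by
      unfold get_strain_media
      rw [pvLoopA_zero]
      simp only [h, if_false, List.nil_append, htw]
      refine Prod.ext (by simp [String.ofList_toList]) (pvStrEq ?_)
      simp [PySem.Chars.slice_eq_listSlice, PySem.List.slice_from_one]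
    rw [hA, hB]
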